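-- pv_equiv track=rewrite | github.com/onojk/budget-tracker | fix_dashboard_routes.py | strip_root_and_dashboard_routes
-- ===== SOURCE A (Python) =====
-- def strip_root_and_dashboard_routes(lines):
--     """
--     Remove any existing @app.route('/') / @app.route("/") /
--     @app.route('/dashboard') / @app.route("/dashboard") blocks.
--     """
--     new_lines = []
--     i = 0
--     n = len(lines)
--
--     while i < n:
--         line = lines[i]
--         stripped = line.lstrip()
--
--         if stripped.startswith("@app.route") and (
--             "'/'" in stripped
--             or '"/"' in stripped
--             or "'/dashboard'" in stripped
--             or '"/dashboard"' in stripped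
--         ):
--             # Skip all consecutive decorators for this view
--             i += 1
--             while i < n and lines[i].lstrip().startswith("@app.route"):
--                 i += 1
--
--             # Skip the def line (function signature) if present
--             if i < n and lines[i].lstrip().startswith("def "):
--                 func_indent = len(lines[i]) - len(lines[i].lstrip())
--                 i += 1
--
--                 # Skip function body (indented more than def)
--                 while i < n:
--                     if lines[i].strip() == "":
--                         i += 1
--                         continue
--                     indent = len(lines[i]) - len(lines[i].lstrip())
--                     if indent > func_indent:
--                         i += 1
--                         continue
--                     # Dedented back to top-level: stop skipping
--                     break
--             continue
--         else:
--             new_lines.append(line)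
--             i += 1
--
--     return new_lines
-- ===== SOURCE B (Python) =====
-- def strip_root_and_dashboard_routes(lines):
--     """
--     Remove any existing @app.route('/') / @app.route("/") /
--     @app.route('/dashboard') / @app.route("/dashboard") blocks.
--     """
--     NORMAL, DECO = -2, -1  # mode >= 0 means "inside function body with that def-indent"
--     out = []
--     mode = NORMAL
--     for line in lines:
--         stripped = line.lstrip()
--         if mode == DECO:
--             if stripped.startswith("@app.route"):
--                 continue
--             if stripped.startswith("def "):
--                 mode = len(line) - len(stripped)
--                 continue
--             mode = NORMAL
--         elif mode >= 0:
--             if line.strip() == "":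
--                 continue
--             if len(line) - len(stripped) > mode:
--                 continue
--             mode = NORMAL
--         # NORMAL: decide whether this line starts a block to delete
--         if stripped.startswith("@app.route") and (
--             "'/'" in stripped
--             or '"/"' in stripped
--             or "'/dashboard'" in stripped
--             or '"/dashboard"' in stripped
--         ):
--             mode = DECO
--         else:
--             out.append(line)
--     return out
-- ===== Notes on version B (the rewrite author's own statement) =====
-- stated objective: alternative
-- what changed: Replaces A's index-driven outer while loop with nested skip-while loops by a single forward pass over the lines carrying an explicit mode state (normal / skipping decorators / skipping a body at a given def-indent), deciding keep-or-drop per line.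
import Mathlib
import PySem

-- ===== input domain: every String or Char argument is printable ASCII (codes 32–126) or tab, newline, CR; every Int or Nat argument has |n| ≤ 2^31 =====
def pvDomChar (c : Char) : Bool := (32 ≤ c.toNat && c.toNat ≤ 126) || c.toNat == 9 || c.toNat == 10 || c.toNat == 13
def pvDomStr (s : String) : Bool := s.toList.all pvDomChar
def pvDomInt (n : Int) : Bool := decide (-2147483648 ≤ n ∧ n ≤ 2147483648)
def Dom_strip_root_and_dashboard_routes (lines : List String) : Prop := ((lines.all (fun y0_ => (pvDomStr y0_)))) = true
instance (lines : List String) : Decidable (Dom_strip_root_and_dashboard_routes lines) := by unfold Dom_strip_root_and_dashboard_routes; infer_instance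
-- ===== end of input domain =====

-- B replaces A's index-driven nested while-loops by a single pass with an explicit
-- mode state (normal / skipping-decorators / skipping-body) — objective: alternative decomposition, same cost.

-- ===== PORT A =====
-- shared by both ports: the decorator test of the Python source
def pvIsTarget (stripped : String) : Bool :=
  PySem.Str.startswith stripped "@app.route" &&
    (PySem.Str.isIn "'/'" stripped || PySem.Str.isIn "\"/\"" stripped ||
     PySem.Str.isIn "'/dashboard'" stripped || PySem.Str.isIn "\"/dashboard\"" stripped)

-- inner while: skip consecutive @app.route decorator lines (suffix of lines from i)
def stripA_skipDecos : List String → List String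
  | [] => []
  | l :: rest =>
    if PySem.Str.startswith (PySem.Str.lstrip l) "@app.route" then stripA_skipDecos rest
    else l :: rest

-- inner while: skip the function body (blank lines and lines indented more than func_indent)
def stripA_skipBody (funcIndent : Int) : List String → List String
  | [] => []
  | l :: rest =>
    if PySem.Str.strip l == "" then stripA_skipBody funcIndent rest
    else if PySem.Str.len l - PySem.Str.len (PySem.Str.lstrip l) > funcIndent then
      stripA_skipBody funcIndent rest
    else l :: rest

-- after the decorators: skip the def line + body if present (the 'if i < n and … def' part)
def stripA_afterDecos : List String → List String
  | [] => []
  | l2 :: rest3 =>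
    if PySem.Str.startswith (PySem.Str.lstrip l2) "def " then
      stripA_skipBody (PySem.Str.len l2 - PySem.Str.len (PySem.Str.lstrip l2)) rest3
    else l2 :: rest3

-- after a matching decorator: skip decorators, then the def line + body if present
def stripA_resume (xs : List String) : List String :=
  stripA_afterDecos (stripA_skipDecos xs)

theorem stripA_skipDecos_len : ∀ xs : List String, (stripA_skipDecos xs).length ≤ xs.length := by
  intro xs; induction xs with
  | nil => simp [stripA_skipDecos]
  | cons l rest ih => simp only [stripA_skipDecos]; split <;> simp <;> omega

theorem stripA_skipBody_len (fi : Int) :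
    ∀ xs : List String, (stripA_skipBody fi xs).length ≤ xs.length := by
  intro xs; induction xs with
  | nil => simp [stripA_skipBody]
  | cons l rest ih =>
    simp only [stripA_skipBody]
    split
    · simp; omega
    · split
      · simp; omega
      · simp

theorem stripA_afterDecos_len : ∀ xs : List String, (stripA_afterDecos xs).length ≤ xs.length := by
  intro xs
  rcases xs with _ | ⟨l2, rest3⟩
  · simp [stripA_afterDecos]
  · simp only [stripA_afterDecos]
    split
    · have hb := stripA_skipBody_len (PySem.Str.len l2 - PySem.Str.len (PySem.Str.lstrip l2)) rest3
      simp only [List.length_cons]; omega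
    · simp

theorem stripA_resume_len (xs : List String) : (stripA_resume xs).length ≤ xs.length := by
  unfold stripA_resume
  have h1 := stripA_afterDecos_len (stripA_skipDecos xs)
  have h2 := stripA_skipDecos_len xs
  omega

-- outer while loop of A, on the suffix of lines starting at i
def stripA_loop : List String → List String
  | [] => []
  | l :: rest =>
    if pvIsTarget (PySem.Str.lstrip l) then
      stripA_loop (stripA_resume rest)
    else l :: stripA_loop rest
  termination_by xs => xs.length
  decreasing_by
  · have := stripA_resume_len rest; simp; omega
  · simp

def strip_root_and_dashboard_routes (lines : List String) : List String :=
  stripA_loop lines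

-- ===== PORT B =====
-- one transition of the state machine: (new mode, keep this line?)
-- mode = -2 normal, -1 skipping decorators, ≥ 0 skipping a body with that def-indent
def stripB_normal (stripped : String) : Int × Bool :=
  if pvIsTarget stripped then (-1, false) else (-2, true)

def stripB_step (mode : Int) (l : String) : Int × Bool :=
  let stripped := PySem.Str.lstrip l
  if mode = -1 then
    if PySem.Str.startswith stripped "@app.route" then (-1, false)
    else if PySem.Str.startswith stripped "def " then
      (PySem.Str.len l - PySem.Str.len stripped, false)
    else stripB_normal stripped
  else if 0 ≤ mode then
    if PySem.Str.strip l == "" then (mode, false)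
    else if PySem.Str.len l - PySem.Str.len stripped > mode then (mode, false)
    else stripB_normal stripped
  else stripB_normal stripped

def stripB_go (mode : Int) : List String → List String
  | [] => []
  | l :: rest =>
    match stripB_step mode l with
    | (m, true) => l :: stripB_go m rest
    | (m, false) => stripB_go m rest

def strip_root_and_dashboard_routes_alt (lines : List String) : List String :=
  stripB_go (-2) lines

-- ===== PRECONDITION & SPEC =====
def Spec_strip_root_and_dashboard_routes (lines : List String) (out : List String) : Prop := out = strip_root_and_dashboard_routes_alt lines
instance (lines : List String) (out : List String) : Decidable (Spec_strip_root_and_dashboard_routes lines out) := by unfold Spec_strip_root_and_dashboard_routes; infer_instance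

-- ===== CLAIM (what is proved, stated in full; the proofs are below) =====
def Claim_equal_strip_root_and_dashboard_routes : Prop := ∀ (lines : List String), Dom_strip_root_and_dashboard_routes lines → Spec_strip_root_and_dashboard_routes lines (strip_root_and_dashboard_routes lines)

-- ===== LEMMAS AND PROOFS =====

theorem stripB_go_cons (mode : Int) (l : String) (rest : List String) :
    stripB_go mode (l :: rest) =
      if (stripB_step mode l).2 then l :: stripB_go (stripB_step mode l).1 rest
      else stripB_go (stripB_step mode l).1 rest := by
  rcases h : stripB_step mode l with ⟨m, k⟩
  cases k <;> simp [stripB_go, h]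

theorem stripA_loop_cons (l : String) (rest : List String) :
    stripA_loop (l :: rest) =
      if pvIsTarget (PySem.Str.lstrip l) then stripA_loop (stripA_resume rest)
      else l :: stripA_loop rest := by
  simp only [stripA_loop]

-- B's normal-mode step agrees with A's outer-loop head handling
theorem stripB_step_normal (l : String) :
    stripB_step (-2) l = stripB_normal (PySem.Str.lstrip l) := by
  unfold stripB_step
  rw [if_neg (by decide : ¬((-2 : Int) = -1)), if_neg (by decide : ¬((0:Int) ≤ -2))]

-- simultaneous invariant: B's three modes correspond to A's three loop positions
theorem stripB_eq_stripA : ∀ N, ∀ xs : List String, xs.length < N →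
    (stripB_go (-2) xs = stripA_loop xs) ∧
    (stripB_go (-1) xs = stripA_loop (stripA_resume xs)) ∧
    (∀ fi : Int, 0 ≤ fi → stripB_go fi xs = stripA_loop (stripA_skipBody fi xs)) := by
  intro N
  induction N with
  | zero => intro xs h; omega
  | succ N ih =>
    intro xs hlen
    rcases xs with _ | ⟨l, rest⟩
    · refine ⟨by simp [stripB_go, stripA_loop], ?_, ?_⟩
      · show stripB_go (-1) [] = stripA_loop (stripA_resume [])
        simp [stripB_go, stripA_loop, stripA_resume, stripA_skipDecos, stripA_afterDecos]
      · intro fi _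
        simp [stripB_go, stripA_loop, stripA_skipBody]
    · have hrest : rest.length < N := by simp at hlen; omega
      obtain ⟨ha, hb, hc⟩ := ih rest hrest
      have hnormal : stripB_go (-2) (l :: rest) = stripA_loop (l :: rest) := by
        rw [stripB_go_cons, stripB_step_normal, stripA_loop_cons]
        unfold stripB_normal
        by_cases ht : pvIsTarget (PySem.Str.lstrip l) = true
        · rw [if_pos ht, if_pos ht]; simpa using hb
        · rw [if_neg ht, if_neg ht]; simpa using congrArg (l :: ·) ha
      refine ⟨hnormal, ?_, ?_⟩
      · -- mode = -1 (decorator skipping)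
        rw [stripB_go_cons]
        unfold stripB_step
        rw [if_pos rfl]
        by_cases h1 : PySem.Str.startswith (PySem.Str.lstrip l) "@app.route" = true
        · rw [if_pos h1]
          have : stripA_resume (l :: rest) = stripA_resume rest := by
            unfold stripA_resume; simp only [stripA_skipDecos]; rw [if_pos h1]
          rw [this]; simpa using hb
        · rw [if_neg h1]
          by_cases h2 : PySem.Str.startswith (PySem.Str.lstrip l) "def " = true
          · rw [if_pos h2]
            have hres : stripA_resume (l :: rest) =
                stripA_skipBody (PySem.Str.len l - PySem.Str.len (PySem.Str.lstrip l)) rest := by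
              unfold stripA_resume; simp only [stripA_skipDecos]
              rw [if_neg h1]; simp only [stripA_afterDecos]; rw [if_pos h2]
            have hfi : (0:Int) ≤ PySem.Str.len l - PySem.Str.len (PySem.Str.lstrip l) := by
              simp only [PySem.Str.len_eq, ← String.length_toList, PySem.Str.toList_lstrip]
              have h3 : (PySem.Chars.lstrip l.toList).length ≤ l.toList.length := by
                simp [PySem.Chars.lstrip]
                exact List.length_dropWhile_le _ _
              omega
            rw [hres]; simpa using hc _ hfi
          · -- not a decorator, not a def: A resumes at this very line; B falls to normal
            rw [if_neg h2]
            have hres : stripA_resume (l :: rest) = l :: rest := by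
              unfold stripA_resume; simp only [stripA_skipDecos]
              rw [if_neg h1]; simp only [stripA_afterDecos]; rw [if_neg h2]
            rw [hres, ← hnormal, stripB_go_cons, stripB_step_normal]
      · -- mode = fi ≥ 0 (body skipping)
        intro fi hfi
        rw [stripB_go_cons]
        unfold stripB_step
        rw [if_neg (by omega : ¬ fi = -1), if_pos hfi]
        by_cases hblank : (PySem.Str.strip l == "") = true
        · rw [if_pos hblank]
          have : stripA_skipBody fi (l :: rest) = stripA_skipBody fi rest := by
            simp only [stripA_skipBody]; rw [if_pos hblank]
          rw [this]; simpa using hc fi hfi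
        · rw [if_neg hblank]
          by_cases hind : PySem.Str.len l - PySem.Str.len (PySem.Str.lstrip l) > fi
          · rw [if_pos hind]
            have : stripA_skipBody fi (l :: rest) = stripA_skipBody fi rest := by
              simp only [stripA_skipBody]; rw [if_neg hblank, if_pos hind]
            rw [this]; simpa using hc fi hfi
          · rw [if_neg hind]
            have : stripA_skipBody fi (l :: rest) = l :: rest := by
              simp only [stripA_skipBody]; rw [if_neg hblank, if_neg hind]
            rw [this, ← hnormal, stripB_go_cons, stripB_step_normal]

-- ===== VERDICT (by name: the statement is the Claim_ definition above) =====
theorem strip_root_and_dashboard_routes_spec : Claim_equal_strip_root_and_dashboard_routes := by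
  intro lines _
  unfold Spec_strip_root_and_dashboard_routes strip_root_and_dashboard_routes strip_root_and_dashboard_routes_alt
  exact ((stripB_eq_stripA (lines.length + 1) lines (by omega)).1).symm
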